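-- pv_equiv track=rewrite | github.com/meow930908/tra-fastapi-planner | app/algorithms/dijkstra.py | compress_segments
-- ===== SOURCE A (Python) =====
-- def compress_segments(path):
--     if not path:
--         return []
--     merged = [dict(path[0])]
--     for e in path[1:]:
--         if e["train_no"] == merged[-1]["train_no"]:
--             merged[-1]["destination"] = e["destination"]
--             merged[-1]["arr"] = e["arr"]
--         else:
--             merged.append(dict(e))
--     return merged
-- ===== SOURCE B (Python) =====
-- def compress_segments(path):
--     # Two-phase: split into maximal runs of equal train_no, then emit one
--     # merged dict per run (destination/arr taken from the run's last element).
--     runs = []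
--     for e in path:
--         if runs and e["train_no"] == runs[-1][0]["train_no"]:
--             runs[-1].append(e)
--         else:
--             runs.append([e])
--     out = []
--     for run in runs:
--         d = dict(run[0])
--         if len(run) > 1:
--             last = run[-1]
--             d["destination"] = last["destination"]
--             d["arr"] = last["arr"]
--         out.append(d)
--     return out
-- ===== Notes on version B (the rewrite author's own statement) =====
-- stated objective: idiomatic
-- what changed: B first splits the path into maximal runs of equal train_no and then emits one merged dict per run (taking destination/arr from the run's last element only), instead of A's single pass that mutates the last merged dict in place for every matching element.
import Mathlib
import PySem

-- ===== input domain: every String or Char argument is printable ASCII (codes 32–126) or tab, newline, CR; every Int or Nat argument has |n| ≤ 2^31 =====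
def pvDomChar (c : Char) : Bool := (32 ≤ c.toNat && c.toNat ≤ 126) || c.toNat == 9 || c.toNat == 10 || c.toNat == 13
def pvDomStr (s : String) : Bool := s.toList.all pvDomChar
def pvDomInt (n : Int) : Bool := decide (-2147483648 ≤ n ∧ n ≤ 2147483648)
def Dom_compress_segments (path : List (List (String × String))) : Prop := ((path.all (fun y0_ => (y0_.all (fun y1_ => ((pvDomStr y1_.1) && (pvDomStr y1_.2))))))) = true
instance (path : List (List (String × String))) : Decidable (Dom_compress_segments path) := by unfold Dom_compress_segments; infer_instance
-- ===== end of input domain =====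

-- B rebuilds the result from maximal runs of equal train_no (two-phase decomposition) instead of A's
-- in-place mutation of the last merged dict; return values agree on all inputs where Python A returns.

-- ===== PORT A =====
def compress_segments (path : List (List (String × String))) : List (List (String × String)) :=
  match path with
  | [] => []
  | p0 :: rest =>
    (rest.foldl (fun merged e =>
        let ed := PySem.Dict.mk e
        let last := merged.getLastD PySem.Dict.empty
        if ed.getD "train_no" "" == last.getD "train_no" "" then
          merged.dropLast ++
            [(last.insert "destination" (ed.getD "destination" "")).insert "arr" (ed.getD "arr" "")]
        else
          merged ++ [PySem.Dict.mk e])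
      [PySem.Dict.mk p0]).map PySem.Dict.items

-- ===== PORT B =====
def compress_segments_alt (path : List (List (String × String))) : List (List (String × String)) :=
  let runs := path.foldl (fun runs e =>
      match runs.getLast? with
      | some r =>
        if (PySem.Dict.mk e).getD "train_no" "" == (PySem.Dict.mk (r.headD [])).getD "train_no" "" then
          runs.dropLast ++ [r ++ [e]]
        else
          runs ++ [[e]]
      | none => [[e]]) ([] : List (List (List (String × String))))
  runs.map (fun run =>
    let d := PySem.Dict.mk (run.headD [])
    if run.length > 1 then
      let last := PySem.Dict.mk (run.getLastD [])
      ((d.insert "destination" (last.getD "destination" "")).insert "arr" (last.getD "arr" "")).items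
    else d.items)

-- ===== PRECONDITION & SPEC =====
-- Pre_ is exactly where the Python A returns (elsewhere it raises KeyError): with ≥ 2 segments every
-- segment needs a "train_no" key, and every segment whose train_no equals its predecessor's needs
-- "destination" and "arr" keys.
def Pre_compress_segments (path : List (List (String × String))) : Prop :=
  path.length ≤ 1 ∨
  ((∀ e ∈ path, (PySem.Dict.mk e).contains "train_no" = true) ∧
   (∀ pr ∈ path.zip path.tail,
      (PySem.Dict.mk pr.2).getD "train_no" "" = (PySem.Dict.mk pr.1).getD "train_no" "" →
      (PySem.Dict.mk pr.2).contains "destination" = true ∧ (PySem.Dict.mk pr.2).contains "arr" = true))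
instance (path : List (List (String × String))) : Decidable (Pre_compress_segments path) := by
  unfold Pre_compress_segments; infer_instance

def pvWitness_compress_segments : (List (List (String × String))) :=
  [[("train_no", "152"), ("destination", "Taipei"), ("arr", "10:00")],
   [("train_no", "152"), ("destination", "Hsinchu"), ("arr", "10:40")],
   [("train_no", "207"), ("destination", "Taichung"), ("arr", "12:00")]]

def Spec_compress_segments (path : List (List (String × String))) (out : List (List (String × String))) : Prop := out = compress_segments_alt path
instance (path : List (List (String × String))) (out : List (List (String × String))) : Decidable (Spec_compress_segments path out) := by unfold Spec_compress_segments; infer_instance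

-- ===== CLAIM (what is proved, stated in full; the proofs are below) =====
def Claim_equal_compress_segments : Prop := ∀ (path : List (List (String × String))), Dom_compress_segments path → Pre_compress_segments path → Spec_compress_segments path (compress_segments path)

-- ===== LEMMAS AND PROOFS =====

-- the mutation A performs on the current merged dict for one matching element e
def pvFstep (d : PySem.Dict String String) (e : List (String × String)) : PySem.Dict String String :=
  (d.insert "destination" ((PySem.Dict.mk e).getD "destination" "")).insert "arr"
    ((PySem.Dict.mk e).getD "arr" "")

-- A's loop, with the untouched prefix of `merged` factored out
def pvG (cur : PySem.Dict String String) : List (List (String × String)) → List (PySem.Dict String String)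
  | [] => [cur]
  | e :: es =>
    if (PySem.Dict.mk e).getD "train_no" "" == cur.getD "train_no" "" then
      pvG (pvFstep cur e) es
    else
      cur :: pvG (PySem.Dict.mk e) es

-- B's run-splitting loop, with the finished runs factored out
def pvRuns (r : List (List (String × String))) : List (List (String × String)) → List (List (List (String × String)))
  | [] => [r]
  | e :: es =>
    if (PySem.Dict.mk e).getD "train_no" "" == (PySem.Dict.mk (r.headD [])).getD "train_no" "" then
      pvRuns (r ++ [e]) es
    else
      r :: pvRuns [e] es

def pvPreFinish (run : List (List (String × String))) : PySem.Dict String String :=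
  if run.length > 1 then pvFstep (PySem.Dict.mk (run.headD [])) (run.getLastD [])
  else PySem.Dict.mk (run.headD [])

theorem pvA_acc (es : List (List (String × String))) :
    ∀ (front : List (PySem.Dict String String)) (cur : PySem.Dict String String),
    es.foldl (fun merged e =>
        let ed := PySem.Dict.mk e
        let last := merged.getLastD PySem.Dict.empty
        if ed.getD "train_no" "" == last.getD "train_no" "" then
          merged.dropLast ++
            [(last.insert "destination" (ed.getD "destination" "")).insert "arr" (ed.getD "arr" "")]
        else
          merged ++ [PySem.Dict.mk e]) (front ++ [cur]) = front ++ pvG cur es := by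
  induction es with
  | nil => intro front cur; simp [pvG]
  | cons e es ih =>
    intro front cur
    simp only [List.foldl_cons, List.getLastD_concat, List.dropLast_concat]
    rw [pvG]
    by_cases h : ((PySem.Dict.mk e).getD "train_no" "" == cur.getD "train_no" "") = true
    · rw [if_pos h, if_pos h]; exact ih front (pvFstep cur e)
    · rw [if_neg h, if_neg h, ih (front ++ [cur]) (PySem.Dict.mk e), List.append_assoc]
      rfl

theorem pvB_acc (es : List (List (String × String))) :
    ∀ (front : List (List (List (String × String)))) (r : List (List (String × String))),
    es.foldl (fun runs e =>
      match runs.getLast? with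
      | some r =>
        if (PySem.Dict.mk e).getD "train_no" "" == (PySem.Dict.mk (r.headD [])).getD "train_no" "" then
          runs.dropLast ++ [r ++ [e]]
        else
          runs ++ [[e]]
      | none => [[e]]) (front ++ [r]) = front ++ pvRuns r es := by
  induction es with
  | nil => intro front r; simp [pvRuns]
  | cons e es ih =>
    intro front r
    simp only [List.foldl_cons, List.getLast?_concat, List.dropLast_concat]
    rw [pvRuns]
    by_cases h : ((PySem.Dict.mk e).getD "train_no" "" == (PySem.Dict.mk (r.headD [])).getD "train_no" "") = true
    · rw [if_pos h, if_pos h, ih]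
    · rw [if_neg h, if_neg h, ih (front ++ [r]) [e], List.append_assoc]
      rfl

theorem pvSwapInsert (d : PySem.Dict String String) (k k' : String) (v w u : String) (h : k ≠ k') :
    ((d.insert k v).insert k' w).insert k u = (d.insert k u).insert k' w := by
  have hkk' : (k == k') = false := beq_eq_false_iff_ne.mpr h
  have hk'k : (k' == k) = false := beq_eq_false_iff_ne.mpr (Ne.symm h)
  apply PySem.Dict.ext
  have hc1 : (d.insert k v).contains k' = d.contains k' := by
    rw [PySem.Dict.contains_insert, hk'k, Bool.false_or]
  have hc2 : ((d.insert k v).insert k' w).contains k = true := by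
    rw [PySem.Dict.contains_insert, hkk', Bool.false_or, PySem.Dict.contains_insert_self]
  have hc3 : (d.insert k u).contains k' = d.contains k' := by
    rw [PySem.Dict.contains_insert, hk'k, Bool.false_or]
  by_cases hc : d.contains k = true
  all_goals by_cases hc' : d.contains k' = true
  · rw [PySem.Dict.items_insert_of_contains _ _ hc2,
        PySem.Dict.items_insert_of_contains _ _ (hc1.trans hc'),
        PySem.Dict.items_insert_of_contains _ _ hc,
        PySem.Dict.items_insert_of_contains _ _ (hc3.trans hc'),
        PySem.Dict.items_insert_of_contains _ _ hc]
    simp only [List.map_map]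
    apply List.map_congr_left
    intro p _
    by_cases hp : (p.1 == k) = true
    · have : p.1 = k := eq_of_beq hp
      simp [Function.comp, this, hkk']
    · by_cases hp' : (p.1 == k') = true
      · have : p.1 = k' := eq_of_beq hp'
        simp [Function.comp, this, hk'k]
      · simp [Function.comp, hp, hp']
  · have hc1' : (d.insert k v).contains k' = false := by rw [hc1]; simpa using hc'
    have hc3' : (d.insert k u).contains k' = false := by rw [hc3]; simpa using hc'
    rw [PySem.Dict.items_insert_of_contains _ _ hc2,
        PySem.Dict.items_insert_of_not_contains _ _ hc1',
        PySem.Dict.items_insert_of_contains _ _ hc,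
        PySem.Dict.items_insert_of_not_contains _ _ hc3',
        PySem.Dict.items_insert_of_contains _ _ hc]
    simp only [List.map_append, List.map_map]
    apply congrArg₂ _ ?_ ?_
    · apply List.map_congr_left
      intro p _
      by_cases hp : (p.1 == k) = true
      · have : p.1 = k := eq_of_beq hp
        simp [Function.comp, this]
      · simp [Function.comp, hp]
    · simp [Ne.symm h]
  · have hnc : d.contains k = false := by simpa using hc
    have hcv : (d.insert k v).contains k' = true := hc1.trans hc'
    have hcu : (d.insert k u).contains k' = true := hc3.trans hc'
    rw [PySem.Dict.items_insert_of_contains _ _ hc2,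
        PySem.Dict.items_insert_of_contains _ _ hcv,
        PySem.Dict.items_insert_of_not_contains _ _ hnc,
        PySem.Dict.items_insert_of_contains _ _ hcu,
        PySem.Dict.items_insert_of_not_contains _ _ hnc]
    simp only [List.map_append, List.map_map]
    apply congrArg₂ _ ?_ ?_
    · apply List.map_congr_left
      intro p hp
      have hpk : (p.1 == k) = false := by
        by_contra hx
        have hpk' : p.1 = k := eq_of_beq (by simpa using hx)
        have : k ∈ d.keys := by
          rw [← hpk']; exact PySem.Dict.mem_keys_of_mem_items _ hp
        rw [← PySem.Dict.contains_iff_mem_keys] at this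
        rw [hnc] at this; exact Bool.false_ne_true this
      by_cases hp' : (p.1 == k') = true
      · have : p.1 = k' := eq_of_beq hp'
        simp [Function.comp, this, hk'k]
      · simp [Function.comp, hp', hpk]
    · simp [h]
  · have hnc : d.contains k = false := by simpa using hc
    have hc1' : (d.insert k v).contains k' = false := by rw [hc1]; simpa using hc'
    have hc3' : (d.insert k u).contains k' = false := by rw [hc3]; simpa using hc'
    rw [PySem.Dict.items_insert_of_contains _ _ hc2,
        PySem.Dict.items_insert_of_not_contains _ _ hc1',
        PySem.Dict.items_insert_of_not_contains _ _ hnc,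
        PySem.Dict.items_insert_of_not_contains _ _ hc3',
        PySem.Dict.items_insert_of_not_contains _ _ hnc]
    simp only [List.map_append, List.append_assoc]
    apply congrArg₂ _ ?_ ?_
    · conv_rhs => rw [← List.map_id d.items]
      apply List.map_congr_left
      intro p hp
      have hpk : (p.1 == k) = false := by
        by_contra hx
        have hpk' : p.1 = k := eq_of_beq (by simpa using hx)
        have : k ∈ d.keys := by
          rw [← hpk']; exact PySem.Dict.mem_keys_of_mem_items _ hp
        rw [← PySem.Dict.contains_iff_mem_keys] at this
        rw [hnc] at this; exact Bool.false_ne_true this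
      simp [hpk]
    · simp [Ne.symm h]

theorem pvFstep_fstep (d : PySem.Dict String String) (e e' : List (String × String)) :
    pvFstep (pvFstep d e') e = pvFstep d e := by
  unfold pvFstep
  rw [pvSwapInsert d "destination" "arr" ((PySem.Dict.mk e').getD "destination" "")
        ((PySem.Dict.mk e').getD "arr" "") ((PySem.Dict.mk e).getD "destination" "") (by decide),
      PySem.Dict.insert_insert_self]

theorem pvPreFinish_tn (r : List (List (String × String))) :
    (pvPreFinish r).getD "train_no" "" = (PySem.Dict.mk (r.headD [])).getD "train_no" "" := by
  unfold pvPreFinish pvFstep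
  split
  · rw [PySem.Dict.getD_insert, PySem.Dict.getD_insert]
    simp
  · rfl

theorem pvPreFinish_concat (r : List (List (String × String))) (e : List (String × String)) (h : r ≠ []) :
    pvPreFinish (r ++ [e]) = pvFstep (pvPreFinish r) e := by
  cases r with
  | nil => exact absurd rfl h
  | cons a t =>
    cases t with
    | nil => simp [pvPreFinish]
    | cons b t' =>
      have h1 : ((a :: b :: t') ++ [e]).length > 1 := by simp
      have h2 : (a :: b :: t').length > 1 := by simp
      rw [pvPreFinish, pvPreFinish, if_pos h1, if_pos h2, List.getLastD_concat]
      have hh : ((a :: b :: t') ++ [e]).headD [] = a := rfl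
      rw [hh, pvFstep_fstep]
      rfl

theorem pvMain (es : List (List (String × String))) :
    ∀ (r : List (List (String × String))), r ≠ [] →
    (pvRuns r es).map (fun run => (pvPreFinish run).items) = (pvG (pvPreFinish r) es).map PySem.Dict.items := by
  induction es with
  | nil => intro r hr; simp [pvRuns, pvG]
  | cons e es ih =>
    intro r hr
    rw [pvRuns, pvG, pvPreFinish_tn]
    by_cases hc : ((PySem.Dict.mk e).getD "train_no" "" == (PySem.Dict.mk (r.headD [])).getD "train_no" "") = true
    · rw [if_pos hc, if_pos hc, ← pvPreFinish_concat r e hr, ih (r ++ [e]) (by simp)]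
    · rw [if_neg hc, if_neg hc]
      simp only [List.map_cons]
      have hone : pvPreFinish [e] = PySem.Dict.mk e := by simp [pvPreFinish]
      rw [ih [e] (by simp), hone]

-- ===== VERDICT (by name: the statement is the Claim_ definition above) =====
theorem compress_segments_spec : Claim_equal_compress_segments := by
  intro path hdom hpre
  unfold Spec_compress_segments compress_segments compress_segments_alt
  cases path with
  | nil => rfl
  | cons p0 rest =>
    have hA := pvA_acc rest [] (PySem.Dict.mk p0)
    simp only [List.nil_append] at hA
    have hB := pvB_acc rest [] [p0]
    simp only [List.nil_append] at hB
    simp only [List.foldl_cons, List.getLast?_nil]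
    rw [hA, hB]
    have hfin : (pvRuns [p0] rest).map (fun run =>
        let d := PySem.Dict.mk (run.headD [])
        if run.length > 1 then
          let last := PySem.Dict.mk (run.getLastD [])
          ((d.insert "destination" (last.getD "destination" "")).insert "arr" (last.getD "arr" "")).items
        else d.items) = (pvRuns [p0] rest).map (fun run => (pvPreFinish run).items) := by
      apply List.map_congr_left
      intro run _
      simp only [pvPreFinish, pvFstep]
      split <;> rfl
    rw [hfin, pvMain rest [p0] (by simp)]
    have hone : pvPreFinish [p0] = PySem.Dict.mk p0 := by simp [pvPreFinish]
    rw [hone]
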